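-- pv_equiv track=rewrite | github.com/Beliavsky/Fortran-to-C | xc_post.py | _split_cpp_comment
-- ===== SOURCE A (Python) =====
-- def _split_cpp_comment(line: str) -> tuple[str, str]:
--     in_single = False
--     in_double = False
--     esc = False
--     i = 0
--     while i < len(line) - 1:
--         ch = line[i]
--         if esc:
--             esc = False
--             i += 1
--             continue
--         if ch == "\\" and (in_single or in_double):
--             esc = True
--             i += 1
--             continue
--         if ch == "'" and not in_double:
--             in_single = not in_single
--             i += 1
--             continue
--         if ch == '"' and not in_single:
--             in_double = not in_double
--             i += 1
--             continue
--         if not in_single and not in_double and line[i : i + 2] == "//":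
--             return line[:i], line[i:]
--         i += 1
--     return line, ""
-- ===== SOURCE B (Python) =====
-- def _split_cpp_comment(line: str) -> tuple[str, str]:
--     n = len(line)
--     i = 0
--     while i < n:
--         ch = line[i]
--         if ch == "/" and line[i : i + 2] == "//":
--             return line[:i], line[i:]
--         if ch == "'" or ch == '"':
--             i += 1
--             while i < n and line[i] != ch:
--                 i += 2 if line[i] == "\\" else 1
--             i += 1
--         else:
--             i += 1
--     return line, ""
-- ===== Notes on version B (the rewrite author's own statement) =====
-- stated objective: simpler
-- what changed: A tracks in_single/in_double/esc boolean flags in one flat per-character state machine; B scans at top level only and consumes each string literal wholesale with a dedicated inner skip loop (jumping 2 past backslash escapes), so no persistent mode flags exist and far fewer branches run per character.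
import Mathlib
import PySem

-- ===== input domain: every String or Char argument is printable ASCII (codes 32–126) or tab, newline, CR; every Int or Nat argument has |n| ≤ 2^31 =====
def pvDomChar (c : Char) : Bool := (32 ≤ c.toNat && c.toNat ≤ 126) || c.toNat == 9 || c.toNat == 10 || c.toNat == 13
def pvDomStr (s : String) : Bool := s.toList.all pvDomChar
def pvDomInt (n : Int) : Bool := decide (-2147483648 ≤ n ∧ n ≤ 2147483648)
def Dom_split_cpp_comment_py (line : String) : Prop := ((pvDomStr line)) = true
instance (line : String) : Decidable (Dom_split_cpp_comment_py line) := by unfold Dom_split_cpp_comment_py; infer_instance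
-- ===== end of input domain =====

-- B replaces A's flat boolean state machine (in_single/in_double/esc flags) with a plain
-- scanner that consumes each string literal wholesale in a dedicated inner loop (objective: simpler).

-- ===== PORT A =====
-- A's while loop: index i over the chars, state (in_single, in_double, esc); the loop is
-- bounded, encoded by a fuel argument that starts at cs.length and is proven never to run out.
-- line[i] is cs.getD i ' ' (i is always in range when read); line[i:i+2] is (cs.drop i).take 2.
-- Returns some i when a top-level "//" is found, none when the loop falls through.
def splitA_loop (cs : List Char) : Nat → Nat → Bool → Bool → Bool → Option Nat
  | 0, _, _, _, _ => none
  | fuel+1, i, s, d, e =>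
    if i < cs.length - 1 then
      if e = true then splitA_loop cs fuel (i+1) s d false
      else if cs.getD i ' ' = '\\' ∧ (s = true ∨ d = true) then splitA_loop cs fuel (i+1) s d true
      else if cs.getD i ' ' = '\'' ∧ d = false then splitA_loop cs fuel (i+1) (!s) d e
      else if cs.getD i ' ' = '"' ∧ s = false then splitA_loop cs fuel (i+1) s (!d) e
      else if s = false ∧ d = false ∧ (cs.drop i).take 2 = ['/', '/'] then some i
      else splitA_loop cs fuel (i+1) s d e
    else none

def split_cpp_comment_py (line : String) : String × String :=
  match splitA_loop line.toList line.toList.length 0 false false false with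
  | some i => (String.ofList (line.toList.take i), String.ofList (line.toList.drop i))
  | none => (line, "")

-- ===== PORT B =====
-- B's inner loop: starting at i inside a literal opened by quote q, return the index
-- just past the closing quote (skipping backslash escapes), or past the end.
def splitB_skip (cs : List Char) : Nat → Nat → Char → Nat
  | 0, i, _ => i + 1
  | fuel+1, i, q =>
    if i < cs.length ∧ cs.getD i ' ' ≠ q then
      splitB_skip cs fuel (i + (if cs.getD i ' ' = '\\' then 2 else 1)) q
    else i + 1

-- B's outer loop: top-level scan; literals are skipped via splitB_skip.
def splitB_loop (cs : List Char) : Nat → Nat → Option Nat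
  | 0, _ => none
  | fuel+1, i =>
    if i < cs.length then
      if cs.getD i ' ' = '/' ∧ (cs.drop i).take 2 = ['/', '/'] then some i
      else if cs.getD i ' ' = '\'' ∨ cs.getD i ' ' = '"' then
        splitB_loop cs fuel (splitB_skip cs cs.length (i+1) (cs.getD i ' '))
      else splitB_loop cs fuel (i+1)
    else none

def split_cpp_comment_py_alt (line : String) : String × String :=
  match splitB_loop line.toList line.toList.length 0 with
  | some i => (String.ofList (line.toList.take i), String.ofList (line.toList.drop i))
  | none => (line, "")

-- ===== PRECONDITION & SPEC =====
def Spec_split_cpp_comment_py (line : String) (out : String × String) : Prop := out = split_cpp_comment_py_alt line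
instance (line : String) (out : String × String) : Decidable (Spec_split_cpp_comment_py line out) := by unfold Spec_split_cpp_comment_py; infer_instance

-- ===== CLAIM (what is proved, stated in full; the proofs are below) =====
def Claim_equal_split_cpp_comment_py : Prop := ∀ (line : String), Dom_split_cpp_comment_py line → Spec_split_cpp_comment_py line (split_cpp_comment_py line)

-- ===== LEMMAS AND PROOFS =====

-- Proof-only well-founded twins of the two fuel-bounded loops (the fuel never runs out;
-- bridged below), plus their unfolding lemmas.
def splitA_loopW (cs : List Char) (i : Nat) (s d e : Bool) : Option Nat :=
  if i < cs.length - 1 then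
    if e = true then splitA_loopW cs (i+1) s d false
    else if cs.getD i ' ' = '\\' ∧ (s = true ∨ d = true) then splitA_loopW cs (i+1) s d true
    else if cs.getD i ' ' = '\'' ∧ d = false then splitA_loopW cs (i+1) (!s) d e
    else if cs.getD i ' ' = '"' ∧ s = false then splitA_loopW cs (i+1) s (!d) e
    else if s = false ∧ d = false ∧ (cs.drop i).take 2 = ['/', '/'] then some i
    else splitA_loopW cs (i+1) s d e
  else none
  termination_by cs.length - i

def splitB_skipW (cs : List Char) (i : Nat) (q : Char) : Nat :=
  if h : i < cs.length ∧ cs.getD i ' ' ≠ q then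
    splitB_skipW cs (i + (if cs.getD i ' ' = '\\' then 2 else 1)) q
  else i + 1
  termination_by cs.length - i
  decreasing_by split <;> omega

-- needed by splitB_loopW's decreasing_by: the inner loop advances past i
theorem splitB_skipW_ge_aux (cs : List Char) : ∀ k i q, cs.length - i ≤ k → i + 1 ≤ splitB_skipW cs i q := by
  intro k
  induction k with
  | zero =>
    intro i q hk
    rw [splitB_skipW.eq_def, dif_neg (by omega)]
  | succ k ih =>
    intro i q hk
    rw [splitB_skipW.eq_def]
    split
    · rename_i h
      split
      · have := ih (i+2) q (by omega); omega
      · have := ih (i+1) q (by omega); omega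
    · omega

theorem splitB_skipW_ge (cs : List Char) (i : Nat) (q : Char) : i + 1 ≤ splitB_skipW cs i q :=
  splitB_skipW_ge_aux cs (cs.length - i) i q (by omega)

-- B's outer loop: top-level scan; literals are skipped via splitB_skipW.
def splitB_loopW (cs : List Char) (i : Nat) : Option Nat :=
  if i < cs.length then
    if cs.getD i ' ' = '/' ∧ (cs.drop i).take 2 = ['/', '/'] then some i
    else if cs.getD i ' ' = '\'' ∨ cs.getD i ' ' = '"' then
      splitB_loopW cs (splitB_skipW cs (i+1) (cs.getD i ' '))
    else splitB_loopW cs (i+1)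
  else none
  termination_by cs.length - i
  decreasing_by
  · have := splitB_skipW_ge cs (i+1) (cs.getD i ' '); omega
  · omega


theorem skip_stopW (cs : List Char) (i : Nat) (q : Char)
    (h : ¬ (i < cs.length ∧ cs.getD i ' ' ≠ q)) : splitB_skipW cs i q = i + 1 := by
  rw [splitB_skipW.eq_def, dif_neg h]

theorem skip_goW (cs : List Char) (i : Nat) (q : Char)
    (h : i < cs.length ∧ cs.getD i ' ' ≠ q) :
    splitB_skipW cs i q = splitB_skipW cs (i + (if cs.getD i ' ' = '\\' then 2 else 1)) q := by
  rw [splitB_skipW.eq_def, dif_pos h]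

theorem splitB_loopW_none_of_ge (cs : List Char) (i : Nat) (h : cs.length ≤ i) :
    splitB_loopW cs i = none := by
  rw [splitB_loopW.eq_def, if_neg (by omega)]

-- the head of a "//" slice match is '/'
theorem take2_head (cs : List Char) (i : Nat) (h : (cs.drop i).take 2 = ['/', '/']) :
    cs.getD i ' ' = '/' := by
  have h0 : (cs.drop i)[0]? = some '/' := by
    have := congrArg (fun l => l[0]?) h
    simpa [List.getElem?_take] using this
  rw [List.getElem?_drop] at h0
  simp only [Nat.add_zero] at h0
  simp [List.getD_eq_getElem?_getD, h0]

theorem splitB_loopW_last (cs : List Char) (i : Nat) (h : cs.length ≤ i + 1) :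
    splitB_loopW cs i = none := by
  by_cases hi : cs.length ≤ i
  · exact splitB_loopW_none_of_ge cs i hi
  · have hi' : i < cs.length := by omega
    rw [splitB_loopW.eq_def, if_pos hi']
    have hlen : ((cs.drop i).take 2).length ≤ 1 := by
      simp [List.length_take]; omega
    have hne : (cs.drop i).take 2 ≠ ['/', '/'] := by
      intro hc; rw [hc] at hlen; simp at hlen
    rw [if_neg (by rintro ⟨-, hc⟩; exact hne hc)]
    split_ifs with hq
    · rw [skip_stopW cs (i+1) _ (by omega)]
      exact splitB_loopW_none_of_ge cs (i+2) (by omega)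
    · exact splitB_loopW_none_of_ge cs (i+1) (by omega)

-- Main simulation: A's top-level state equals B's outer loop, and A's in-string states
-- equal B resumed after the literal skip; joint strong induction on cs.length - i.
theorem main_sim (cs : List Char) : ∀ k i, cs.length - i ≤ k →
    (splitA_loopW cs i false false false = splitB_loopW cs i) ∧
    (∀ q, q = '\'' ∨ q = '"' →
      splitA_loopW cs i (q == '\'') (q == '"') false = splitB_loopW cs (splitB_skipW cs i q)) := by
  intro k
  induction k with
  | zero =>
    intro i hk
    have hi : cs.length ≤ i := by omega
    refine ⟨?_, ?_⟩
    · rw [splitA_loopW.eq_def, if_neg (by omega), splitB_loopW_none_of_ge cs i hi]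
    · intro q _
      rw [splitA_loopW.eq_def, if_neg (by omega), skip_stopW cs i q (by omega),
        splitB_loopW_none_of_ge cs (i+1) (by omega)]
  | succ k ih =>
    intro i hk
    by_cases hi : cs.length ≤ i
    · refine ⟨?_, ?_⟩
      · rw [splitA_loopW.eq_def, if_neg (by omega), splitB_loopW_none_of_ge cs i hi]
      · intro q _
        rw [splitA_loopW.eq_def, if_neg (by omega), skip_stopW cs i q (by omega),
          splitB_loopW_none_of_ge cs (i+1) (by omega)]
    · have hi' : i < cs.length := by omega
      have ih1 := ih (i+1) (by omega)
      have ih2 := ih (i+2) (by omega)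
      refine ⟨?_, ?_⟩
      · -- top level
        by_cases hlast : i + 1 = cs.length
        · rw [splitA_loopW.eq_def, if_neg (by omega), splitB_loopW_last cs i (by omega)]
        · have hlt : i < cs.length - 1 := by omega
          rw [splitA_loopW.eq_def, splitB_loopW.eq_def]
          by_cases h1 : cs.getD i ' ' = '\''
          · rw [if_pos hlt, if_pos hi', if_neg (by simp),
              if_neg (by rintro ⟨-, hx | hx⟩ <;> simp at hx),
              if_pos ⟨h1, rfl⟩,
              if_neg (by rintro ⟨hx, -⟩; rw [h1] at hx; exact absurd hx (by decide)),
              if_pos (Or.inl h1), h1]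
            simpa using ih1.2 '\'' (Or.inl rfl)
          · by_cases h2 : cs.getD i ' ' = '"'
            · rw [if_pos hlt, if_pos hi', if_neg (by simp),
                if_neg (by rintro ⟨-, hx | hx⟩ <;> simp at hx),
                if_neg (by rintro ⟨hx, -⟩; exact h1 hx),
                if_pos ⟨h2, rfl⟩,
                if_neg (by rintro ⟨hx, -⟩; rw [h2] at hx; exact absurd hx (by decide)),
                if_pos (Or.inr h2), h2]
              simpa using ih1.2 '"' (Or.inr rfl)
            · by_cases h3 : (cs.drop i).take 2 = ['/', '/']
              · have hc := take2_head cs i h3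
                rw [if_pos hlt, if_pos hi', if_neg (by simp),
                  if_neg (by rintro ⟨-, hx | hx⟩ <;> simp at hx),
                  if_neg (by rintro ⟨hx, -⟩; exact h1 hx),
                  if_neg (by rintro ⟨hx, -⟩; exact h2 hx),
                  if_pos ⟨rfl, rfl, h3⟩, if_pos ⟨hc, h3⟩]
              · rw [if_pos hlt, if_pos hi', if_neg (by simp),
                  if_neg (by rintro ⟨-, hx | hx⟩ <;> simp at hx),
                  if_neg (by rintro ⟨hx, -⟩; exact h1 hx),
                  if_neg (by rintro ⟨hx, -⟩; exact h2 hx),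
                  if_neg (by rintro ⟨-, -, hx⟩; exact h3 hx),
                  if_neg (by rintro ⟨-, hx⟩; exact h3 hx),
                  if_neg (by rintro (hx | hx); exact h1 hx; exact h2 hx)]
                exact ih1.1
      · -- inside a string literal opened by q
        rintro q (rfl | rfl)
        · -- q = '\''  (in_single = true, in_double = false)
          have hb1 : (('\'' : Char) == '\'') = true := by decide
          have hb2 : (('\'' : Char) == '"') = false := by decide
          rw [hb1, hb2]
          by_cases hcq : cs.getD i ' ' = '\''
          · rw [skip_stopW cs i '\'' (fun hx => hx.2 hcq)]
            by_cases hlast : i + 1 = cs.length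
            · rw [splitA_loopW.eq_def, if_neg (by omega),
                splitB_loopW_none_of_ge cs (i+1) (by omega)]
            · have hlt : i < cs.length - 1 := by omega
              rw [splitA_loopW.eq_def, if_pos hlt, if_neg (by simp),
                if_neg (by rintro ⟨hx, -⟩; rw [hcq] at hx; exact absurd hx (by decide)),
                if_pos ⟨hcq, rfl⟩]
              simpa using ih1.1
          · by_cases hbs : cs.getD i ' ' = '\\'
            · rw [skip_goW cs i '\'' ⟨hi', hcq⟩, if_pos hbs]
              by_cases hlast : i + 1 = cs.length
              · rw [splitA_loopW.eq_def, if_neg (by omega),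
                  skip_stopW cs (i+2) '\'' (by omega),
                  splitB_loopW_none_of_ge cs (i+3) (by omega)]
              · have hlt : i < cs.length - 1 := by omega
                rw [splitA_loopW.eq_def, if_pos hlt, if_neg (by simp),
                  if_pos ⟨hbs, Or.inl rfl⟩]
                by_cases hlast2 : i + 2 = cs.length
                · rw [splitA_loopW.eq_def, if_neg (by omega),
                    skip_stopW cs (i+2) '\'' (by omega),
                    splitB_loopW_none_of_ge cs (i+3) (by omega)]
                · have hlt2 : i + 1 < cs.length - 1 := by omega
                  rw [splitA_loopW.eq_def, if_pos hlt2, if_pos rfl]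
                  simpa using ih2.2 '\'' (Or.inl rfl)
            · rw [skip_goW cs i '\'' ⟨hi', hcq⟩, if_neg hbs]
              by_cases hlast : i + 1 = cs.length
              · rw [splitA_loopW.eq_def, if_neg (by omega),
                  skip_stopW cs (i+1) '\'' (by omega),
                  splitB_loopW_none_of_ge cs (i+2) (by omega)]
              · have hlt : i < cs.length - 1 := by omega
                rw [splitA_loopW.eq_def, if_pos hlt, if_neg (by simp),
                  if_neg (by rintro ⟨hx, -⟩; exact hbs hx),
                  if_neg (by rintro ⟨hx, -⟩; exact hcq hx),
                  if_neg (by rintro ⟨-, hx⟩; simp at hx),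
                  if_neg (by rintro ⟨hx, -⟩; simp at hx)]
                simpa using ih1.2 '\'' (Or.inl rfl)
        · -- q = '"'  (in_single = false, in_double = true)
          have hb1 : (('"' : Char) == '\'') = false := by decide
          have hb2 : (('"' : Char) == '"') = true := by decide
          rw [hb1, hb2]
          by_cases hcq : cs.getD i ' ' = '"'
          · rw [skip_stopW cs i '"' (fun hx => hx.2 hcq)]
            by_cases hlast : i + 1 = cs.length
            · rw [splitA_loopW.eq_def, if_neg (by omega),
                splitB_loopW_none_of_ge cs (i+1) (by omega)]
            · have hlt : i < cs.length - 1 := by omega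
              rw [splitA_loopW.eq_def, if_pos hlt, if_neg (by simp),
                if_neg (by rintro ⟨hx, -⟩; rw [hcq] at hx; exact absurd hx (by decide)),
                if_neg (by rintro ⟨-, hx⟩; simp at hx),
                if_pos ⟨hcq, rfl⟩]
              simpa using ih1.1
          · by_cases hbs : cs.getD i ' ' = '\\'
            · rw [skip_goW cs i '"' ⟨hi', hcq⟩, if_pos hbs]
              by_cases hlast : i + 1 = cs.length
              · rw [splitA_loopW.eq_def, if_neg (by omega),
                  skip_stopW cs (i+2) '"' (by omega),
                  splitB_loopW_none_of_ge cs (i+3) (by omega)]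
              · have hlt : i < cs.length - 1 := by omega
                rw [splitA_loopW.eq_def, if_pos hlt, if_neg (by simp),
                  if_pos ⟨hbs, Or.inr rfl⟩]
                by_cases hlast2 : i + 2 = cs.length
                · rw [splitA_loopW.eq_def, if_neg (by omega),
                    skip_stopW cs (i+2) '"' (by omega),
                    splitB_loopW_none_of_ge cs (i+3) (by omega)]
                · have hlt2 : i + 1 < cs.length - 1 := by omega
                  rw [splitA_loopW.eq_def, if_pos hlt2, if_pos rfl]
                  simpa using ih2.2 '"' (Or.inr rfl)
            · rw [skip_goW cs i '"' ⟨hi', hcq⟩, if_neg hbs]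
              by_cases hlast : i + 1 = cs.length
              · rw [splitA_loopW.eq_def, if_neg (by omega),
                  skip_stopW cs (i+1) '"' (by omega),
                  splitB_loopW_none_of_ge cs (i+2) (by omega)]
              · have hlt : i < cs.length - 1 := by omega
                rw [splitA_loopW.eq_def, if_pos hlt, if_neg (by simp),
                  if_neg (by rintro ⟨hx, -⟩; exact hbs hx),
                  if_neg (by rintro ⟨-, hx⟩; simp at hx),
                  if_neg (by rintro ⟨hx, -⟩; exact hcq hx),
                  if_neg (by rintro ⟨-, hx, -⟩; simp at hx)]
                simpa using ih1.2 '"' (Or.inr rfl)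


-- the fuel-bounded port loops never run out of fuel: they equal their WF twins
theorem splitA_bridge (cs : List Char) : ∀ f i s d e, cs.length - 1 - i ≤ f →
    splitA_loop cs f i s d e = splitA_loopW cs i s d e := by
  intro f
  induction f with
  | zero =>
    intro i s d e h
    simp only [splitA_loop]
    rw [splitA_loopW.eq_def, if_neg (by omega)]
  | succ f ih =>
    intro i s d e h
    simp only [splitA_loop]
    rw [splitA_loopW.eq_def]
    split_ifs <;> first | rfl | exact ih _ _ _ _ (by omega)

theorem splitB_skip_bridge (cs : List Char) : ∀ f i q, cs.length - i ≤ f →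
    splitB_skip cs f i q = splitB_skipW cs i q := by
  intro f
  induction f with
  | zero =>
    intro i q h
    simp only [splitB_skip]
    rw [skip_stopW cs i q (by omega)]
  | succ f ih =>
    intro i q h
    simp only [splitB_skip]
    by_cases hc : i < cs.length ∧ cs.getD i ' ' ≠ q
    · rw [if_pos hc, skip_goW cs i q hc]
      exact ih _ _ (by split <;> omega)
    · rw [if_neg hc, skip_stopW cs i q hc]

theorem splitB_loop_bridge (cs : List Char) : ∀ f i, cs.length - i ≤ f →
    splitB_loop cs f i = splitB_loopW cs i := by
  intro f
  induction f with
  | zero =>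
    intro i h
    simp only [splitB_loop]
    rw [splitB_loopW_none_of_ge cs i (by omega)]
  | succ f ih =>
    intro i h
    by_cases hi : i < cs.length
    · simp only [splitB_loop]
      rw [splitB_loopW.eq_def, if_pos hi, if_pos hi,
        splitB_skip_bridge cs cs.length (i+1) (cs.getD i ' ') (by omega)]
      split_ifs with h1 h2
      · rfl
      · exact ih _ (by have := splitB_skipW_ge cs (i+1) (cs.getD i ' '); omega)
      · exact ih _ (by omega)
    · simp only [splitB_loop]
      rw [if_neg hi, splitB_loopW_none_of_ge cs i (by omega)]

-- ===== VERDICT (by name: the statement is the Claim_ definition above) =====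
theorem split_cpp_comment_py_spec : Claim_equal_split_cpp_comment_py := by
  intro line _
  unfold Spec_split_cpp_comment_py split_cpp_comment_py split_cpp_comment_py_alt
  rw [splitA_bridge line.toList line.toList.length 0 false false false (by omega),
    splitB_loop_bridge line.toList line.toList.length 0 (by omega),
    (main_sim line.toList line.toList.length 0 (by omega)).1]
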